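-- pv_equiv track=rewrite | github.com/bitcoin-abe/bitcoin-abe | Abe/util.py | get_search_height
-- ===== SOURCE A (Python) =====
-- from typing import List, Any, Optional, Tuple, Union
--
-- def get_search_height(height: int) -> Optional[int]:
--     """get_search_height"""
--     if height < 2:
--         return None
--     if height & 1:
--         return height >> 1 if height & 2 else height - (height >> 2)
--     bit = 2
--     while (height & bit) == 0:
--         bit <<= 1
--     return height - bit
-- ===== SOURCE B (Python) =====
-- from typing import Optional
--
-- def get_search_height(height: int) -> Optional[int]:
--     """get_search_height"""
--     if height < 2:
--         return None
--     if height & 1: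
--         return height >> 1 if height & 2 else height - (height >> 2)
--     return height & (height - 1)
-- ===== Notes on version B (the rewrite author's own statement) =====
-- stated objective: simpler
-- what changed: Replaced the even-case while loop that scans upward for the lowest set bit with the closed-form bit trick 'height & (height - 1)', which clears the lowest set bit in one expression.
import Mathlib
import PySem

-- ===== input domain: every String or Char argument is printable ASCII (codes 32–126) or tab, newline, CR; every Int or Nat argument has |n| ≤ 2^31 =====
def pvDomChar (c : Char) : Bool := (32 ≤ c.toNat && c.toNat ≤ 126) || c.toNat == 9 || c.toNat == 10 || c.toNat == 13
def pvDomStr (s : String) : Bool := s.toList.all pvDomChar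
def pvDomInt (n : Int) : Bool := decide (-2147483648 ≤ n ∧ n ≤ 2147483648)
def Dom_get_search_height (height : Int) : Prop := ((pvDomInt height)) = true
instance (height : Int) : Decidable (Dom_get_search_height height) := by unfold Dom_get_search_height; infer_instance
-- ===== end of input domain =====

-- B replaces A's bit-scanning while loop (even case) with the closed-form 'height & (height - 1)',
-- which clears the lowest set bit directly; objective: simpler.

-- ===== PORT A =====
-- while (height & bit) == 0: bit <<= 1; return height - bit
-- (fuel only makes the loop total; on Dom the loop always finds a set bit well within 40 steps)
def gshLoop (height bit : Int) : Nat → Int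
  | 0 => height - bit
  | f + 1 =>
    if PySem.Int.band height bit = 0 then gshLoop height (bit <<< 1) f
    else height - bit

def get_search_height (height : Int) : Option Int :=
  if height < 2 then none
  else if PySem.Int.band height 1 ≠ 0 then
    some (if PySem.Int.band height 2 ≠ 0 then height >>> 1 else height - (height >>> 2))
  else some (gshLoop height 2 40)

-- ===== PORT B =====
def get_search_height_alt (height : Int) : Option Int :=
  if height < 2 then none
  else if PySem.Int.band height 1 ≠ 0 then
    some (if PySem.Int.band height 2 ≠ 0 then height >>> 1 else height - (height >>> 2))
  else some (PySem.Int.band height (height - 1))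

-- ===== PRECONDITION & SPEC =====
def Spec_get_search_height (height : Int) (out : Option Int) : Prop := out = get_search_height_alt height
instance (height : Int) (out : Option Int) : Decidable (Spec_get_search_height height out) := by unfold Spec_get_search_height; infer_instance

-- ===== CLAIM (what is proved, stated in full; the proofs are below) =====
def Claim_equal_get_search_height : Prop := ∀ (height : Int), Dom_get_search_height height → Spec_get_search_height height (get_search_height height)

-- ===== LEMMAS AND PROOFS =====

theorem band_natCast (a b : Nat) : PySem.Int.band (a : Int) (b : Int) = ((a &&& b : Nat) : Int) := rfl

theorem and_ee (a b : Nat) : (2*a) &&& (2*b) = 2*(a &&& b) := by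
  apply Nat.eq_of_testBit_eq; intro i; cases i <;>
    simp [Nat.testBit_zero, Nat.testBit_succ, Nat.and_div_two, Nat.mul_mod_right]

theorem and_oe (a b : Nat) : (2*a+1) &&& (2*b) = 2*(a &&& b) := by
  apply Nat.eq_of_testBit_eq; intro i; cases i <;>
    simp [Nat.testBit_zero, Nat.testBit_succ, Nat.and_div_two, Nat.mul_mod_right, Nat.mul_add_div]

theorem and_eo (a b : Nat) : (2*a) &&& (2*b+1) = 2*(a &&& b) := by
  apply Nat.eq_of_testBit_eq; intro i; cases i <;>
    simp [Nat.testBit_zero, Nat.testBit_succ, Nat.and_div_two, Nat.mul_mod_right, Nat.mul_add_div]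

theorem gshLoop_scale (fuel : Nat) (n b : Nat) :
    gshLoop ((2*n : Nat) : Int) ((2*b : Nat) : Int) fuel = 2 * gshLoop (n : Int) (b : Int) fuel := by
  induction fuel generalizing b with
  | zero => simp [gshLoop]; push_cast; ring
  | succ f ih =>
    have hcast : PySem.Int.band ((2*n : Nat) : Int) ((2*b : Nat) : Int) = ((2*n &&& 2*b : Nat) : Int) :=
      band_natCast _ _
    have hand : (2*n) &&& (2*b) = 2*(n &&& b) := and_ee n b
    have hbn : (2*b) <<< 1 = 2*(b <<< 1) := by simp only [Nat.shiftLeft_eq, pow_one]; ring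
    have hb : ((2*b : Nat) : Int) <<< 1 = ((2*(b <<< 1) : Nat) : Int) := congrArg Nat.cast hbn
    have hb2 : ((b : Nat) : Int) <<< 1 = ((b <<< 1 : Nat) : Int) := rfl
    by_cases h : n &&& b = 0
    · have hz : PySem.Int.band ((2*n : Nat) : Int) ((2*b : Nat) : Int) = 0 := by
        rw [hcast, hand, h]; simp
      have hz' : PySem.Int.band ((n : Nat) : Int) ((b : Nat) : Int) = 0 := by
        rw [band_natCast, h]; simp
      rw [gshLoop, gshLoop, if_pos hz, if_pos hz', hb, hb2, ih (b <<< 1)]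
    · have hnz : ¬ PySem.Int.band ((2*n : Nat) : Int) ((2*b : Nat) : Int) = 0 := by
        rw [hcast, hand]; simp; omega
      have hnz' : ¬ PySem.Int.band ((n : Nat) : Int) ((b : Nat) : Int) = 0 := by
        rw [band_natCast]; simpa using h
      rw [gshLoop, gshLoop, if_neg hnz, if_neg hnz']
      push_cast; ring

theorem gshLoop_lowbit (f : Nat) : ∀ (n : Nat), 0 < n → n < 2^f →
    gshLoop (n : Int) (1 : Int) f = ((n &&& (n-1) : Nat) : Int) := by
  induction f with
  | zero => intro n h1 h2; omega
  | succ f ih =>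
    intro n h1 h2
    have hcond : PySem.Int.band (n : Int) 1 = ((n % 2 : Nat) : Int) := by
      rw [show ((1:Int) = ((1:Nat):Int)) from rfl, band_natCast, Nat.and_one_is_mod]
    by_cases hodd : n % 2 = 1
    · -- odd: loop stops at bit = 1; n &&& (n-1) = n - 1
      have hne : ¬ PySem.Int.band (n : Int) 1 = 0 := by rw [hcond, hodd]; decide
      have hrep : n = 2*(n/2) + 1 := by omega
      have hrhs : n &&& (n-1) = n - 1 := by
        calc n &&& (n-1) = (2*(n/2)+1) &&& (2*(n/2)) := by rw [← hrep]; congr 1; omega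
        _ = 2*((n/2) &&& (n/2)) := and_oe _ _
        _ = n - 1 := by rw [Nat.and_self]; omega
      rw [gshLoop, if_neg hne, hrhs]
      push_cast [Nat.cast_sub (by omega : 1 ≤ n)]; ring
    · -- even: one more loop step, then scale down by 2
      have heq : PySem.Int.band (n : Int) 1 = 0 := by
        rw [hcond, show n % 2 = 0 by omega]; rfl
      have hk : 0 < n / 2 := by omega
      have hrep : n = 2*(n/2) := by omega
      have hlt : n / 2 < 2^f := by
        have : 2^(f+1) = 2*2^f := by ring
        omega
      have step : gshLoop (n : Int) (1 : Int) (f+1) = gshLoop ((2*(n/2) : Nat) : Int) ((2*1 : Nat) : Int) f := by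
        rw [gshLoop, if_pos heq, ← hrep]; rfl
      have h1cast : (((1:Nat) : Int)) = (1 : Int) := rfl
      rw [step, gshLoop_scale, h1cast, ih (n/2) hk hlt]
      have hrhs : n &&& (n-1) = 2*((n/2) &&& (n/2 - 1)) := by
        calc n &&& (n-1) = (2*(n/2)) &&& (2*(n/2 - 1)+1) := by rw [← hrep]; congr 1; omega
        _ = 2*((n/2) &&& (n/2 - 1)) := and_eo _ _
      rw [hrhs]; push_cast; ring

-- ===== VERDICT (by name: the statement is the Claim_ definition above) =====
theorem get_search_height_spec : Claim_equal_get_search_height := by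
  intro height hdom
  unfold Spec_get_search_height get_search_height get_search_height_alt
  by_cases hlt : height < 2
  · simp [hlt]
  · have h2 : 2 ≤ height := by omega
    have hbound : height ≤ 2147483648 := by
      unfold Dom_get_search_height pvDomInt at hdom
      simpa using (of_decide_eq_true hdom).2
    obtain ⟨n, rfl⟩ : ∃ n : Nat, height = (n : Int) :=
      ⟨height.toNat, (Int.toNat_of_nonneg (by omega)).symm⟩
    have hn2 : 2 ≤ n := by exact_mod_cast h2
    rw [if_neg hlt, if_neg hlt]
    by_cases hodd : PySem.Int.band (n : Int) 1 ≠ 0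
    · rw [if_pos hodd, if_pos hodd]
    · rw [if_neg hodd, if_neg hodd]
      have heven : n % 2 = 0 := by
        by_contra h
        apply hodd
        rw [show ((1:Int) = ((1:Nat):Int)) from rfl, band_natCast, Nat.and_one_is_mod,
          show n % 2 = 1 by omega]
        decide
      have hnb : n < 2^41 := by
        have h' : (n : Int) ≤ 2147483648 := hbound
        have : n ≤ 2147483648 := by exact_mod_cast h'
        omega
      have hcond : PySem.Int.band (n : Int) 1 = 0 := by
        rw [show ((1:Int) = ((1:Nat):Int)) from rfl, band_natCast, Nat.and_one_is_mod, heven]; rfl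
      have hstart : gshLoop (n : Int) (1 : Int) 41 = gshLoop (n : Int) (2 : Int) 40 := by
        rw [show (41 : Nat) = 40 + 1 from rfl, gshLoop, if_pos hcond,
          show ((1:Int) <<< 1) = 2 from rfl]
      have hmain := gshLoop_lowbit 41 n (by omega) hnb
      have hrhs : PySem.Int.band (n : Int) ((n : Int) - 1) = ((n &&& (n-1) : Nat) : Int) := by
        rw [show ((n : Int) - 1) = ((n - 1 : Nat) : Int) by
              push_cast [Nat.cast_sub (by omega : 1 ≤ n)]; ring,
          band_natCast]
      rw [← hstart, hmain, hrhs]
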